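-- pv_equiv track=rewrite | github.com/HuihanCui/Genomic-Data-Science | Algorithms for DNA sequencing/week3/test2.py | betteroverlap
-- ===== SOURCE A (Python) =====
-- def overlap(a, b, min_length=3):
--     """ Return length of longest suffix of 'a' matching
--         a prefix of 'b' that is at least 'min_length'
--         characters long.  If no such overlap exists,
--         return 0. """
--     start = 0  # start all the way at the left
--     while True:
--         start = a.find(b[:min_length], start)  # look for b's prefix in a
--         if start == -1:  # no more occurrences to right
--             return 0
--         # found occurrence; check for full suffix/prefix match
--         if b.startswith(a[start:]):
--             return len(a)-start
--         start += 1  # move just past previous match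
--
-- def betteroverlap(reads,dic):
--     olaps = {}
--     for read in reads:
--         keypart = read[-30:]
--         relates = dic[keypart]
--         for relateread in relates:
--             if relateread != read:
--                 olen = overlap(read, relateread,30)
--                 if olen >0:
--                     olaps[(read,relateread)] = olen
--     return olaps
-- ===== SOURCE B (Python) =====
-- def overlap(a, b, min_length=3):
--     """Length of the longest suffix of 'a' that is a prefix of 'b', probing
--     candidate overlap lengths directly, longest first.  The overlap must be
--     at least min_length characters long, except that the largest possible
--     overlap is all of b: a whole-b suffix match counts even when b is
--     shorter than min_length (then b[:min_length] is all of b).  0 if no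
--     such overlap exists."""
--     lo = min(min_length, len(b))
--     L = min(len(a), len(b))
--     while L >= lo:
--         if a.endswith(b[:L]):
--             return L
--         L -= 1
--     return 0
--
--
-- def betteroverlap(reads, dic):
--     return {(r, q): olen
--             for r in reads
--             for q in dic[r[-30:]]
--             if q != r and (olen := overlap(r, q, 30)) > 0}
-- ===== Notes on version B (the rewrite author's own statement) =====
-- stated objective: simpler
-- what changed: overlap's find-scan-then-startswith-verify loop is replaced by direct probing of candidate overlap lengths in descending order (first L from min(len(a),len(b)) down to min(min_length,len(b)) with a.endswith(b[:L])), and the driver becomes a single dict comprehension.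
import Mathlib
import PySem

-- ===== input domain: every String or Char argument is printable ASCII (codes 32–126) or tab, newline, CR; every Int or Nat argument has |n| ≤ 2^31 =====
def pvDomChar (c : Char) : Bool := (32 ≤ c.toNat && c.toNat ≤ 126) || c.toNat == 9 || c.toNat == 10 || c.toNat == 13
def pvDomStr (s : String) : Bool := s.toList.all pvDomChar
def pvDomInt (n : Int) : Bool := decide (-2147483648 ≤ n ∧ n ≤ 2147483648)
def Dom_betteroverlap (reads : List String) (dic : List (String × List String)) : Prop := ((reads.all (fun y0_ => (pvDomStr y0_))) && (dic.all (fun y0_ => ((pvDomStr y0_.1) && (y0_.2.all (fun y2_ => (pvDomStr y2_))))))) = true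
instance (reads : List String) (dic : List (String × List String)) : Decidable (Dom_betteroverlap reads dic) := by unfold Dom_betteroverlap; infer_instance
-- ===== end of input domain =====

-- B replaces overlap's find-scan-then-verify loop by direct probing of candidate
-- overlap lengths in descending order, and builds the result as one dict
-- comprehension (objective: simpler).


-- ===== PORT A =====
-- A's overlap: 'while True' loop scanning occurrences of b[:min_length] in a via find.
-- start is always a nonnegative int in the Python loop, kept as a Nat; the fuel
-- argument only makes the while loop structurally recursive (len(a)+1 iterations
-- always suffice: start strictly increases and stays ≤ len(a) while the loop runs).
def ovLoopA (a b : List Char) (minLength : Int) (start : Nat) : Nat → Int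
  | 0 => 0
  | fuel + 1 =>
    let f := PySem.Chars.findFrom a (PySem.Chars.slice b none (some minLength)) (start : Int) none
    if f = -1 then 0
    else if PySem.Chars.startswith b (PySem.Chars.slice a (some f) none) then (a.length : Int) - f
    else ovLoopA a b minLength (f.toNat + 1) fuel

def overlapA (a b : String) (minLength : Int) : Int :=
  ovLoopA a.toList b.toList minLength 0 (a.toList.length + 1)

def betteroverlap (reads : List String) (dic : List (String × List String)) : List (String × String × Int) :=
  (reads.foldl (fun (olaps : PySem.Dict (String × String) Int) read =>
      let keypart := PySem.Str.slice read (some (-30)) none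
      let relates := (PySem.Dict.mk dic).getD keypart []   -- dic[keypart]; KeyError excluded by Pre_
      relates.foldl (fun olaps relateread =>
        if relateread ≠ read then
          let olen := overlapA read relateread 30
          if olen > 0 then olaps.insert (read, relateread) olen else olaps
        else olaps) olaps)
    PySem.Dict.empty).items.map (fun e => (e.1.1, e.1.2, e.2))

-- ===== PORT B =====
-- B's overlap: probe candidate overlap lengths L = min(len a, len b) … lo,
-- longest first, returning the first L with a.endswith(b[:L]); fuel is the exact
-- number of candidate lengths, making the while loop structurally recursive.
def ovLoopB (a b : List Char) (lo L : Int) : Nat → Int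
  | 0 => 0
  | fuel + 1 =>
    if lo ≤ L then
      if PySem.Chars.endswith a (PySem.Chars.slice b none (some L)) then L
      else ovLoopB a b lo (L - 1) fuel
    else 0

def overlapB (a b : String) (minLength : Int) : Int :=
  -- lo = min(min_length, len(b)); L0 = min(len(a), len(b)); fuel = number of candidates
  ovLoopB a.toList b.toList (min minLength (PySem.Str.len b))
    (min (PySem.Str.len a) (PySem.Str.len b))
    ((min (PySem.Str.len a) (PySem.Str.len b) - min minLength (PySem.Str.len b) + 1).toNat)

def betteroverlap_alt (reads : List String) (dic : List (String × List String)) : List (String × String × Int) :=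
  -- dict comprehension: the generated (key, value) stream, folded into a dict
  ((reads.flatMap (fun r =>
      ((PySem.Dict.mk dic).getD (PySem.Str.slice r (some (-30)) none) []).filterMap (fun q =>
        if q ≠ r then
          let olen := overlapB r q 30
          if olen > 0 then some ((r, q), olen) else none
        else none))).foldl
    (fun (d : PySem.Dict (String × String) Int) e => d.insert e.1 e.2)
    PySem.Dict.empty).items.map (fun e => (e.1.1, e.1.2, e.2))

-- ===== PRECONDITION & SPEC =====
-- Pre_ excludes exactly the inputs where dic[read[-30:]] raises KeyError.
def Pre_betteroverlap (reads : List String) (dic : List (String × List String)) : Prop :=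
  ∀ r ∈ reads, ((PySem.Dict.mk dic).get? (PySem.Str.slice r (some (-30)) none)).isSome
instance (reads : List String) (dic : List (String × List String)) : Decidable (Pre_betteroverlap reads dic) := by unfold Pre_betteroverlap; infer_instance

def pvWitness_betteroverlap : List String × (List (String × List String)) :=
  (["AB"], [("AB", ["AB", "CAB"])])

def Spec_betteroverlap (reads : List String) (dic : List (String × List String)) (out : List (String × String × Int)) : Prop := out = betteroverlap_alt reads dic
instance (reads : List String) (dic : List (String × List String)) (out : List (String × String × Int)) : Decidable (Spec_betteroverlap reads dic out) := by unfold Spec_betteroverlap; infer_instance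

-- ===== CLAIM (what is proved, stated in full; the proofs are below) =====
def Claim_equal_betteroverlap : Prop := ∀ (reads : List String) (dic : List (String × List String)), Dom_betteroverlap reads dic → Pre_betteroverlap reads dic → Spec_betteroverlap reads dic (betteroverlap reads dic)

-- ===== LEMMAS AND PROOFS =====

-- the success condition of A's loop at scan position s: b[:30] occurs at s and
-- b.startswith(a[s:])
def pvSucc (a b : List Char) (s : Nat) : Prop :=
  b.take 30 <+: a.drop s ∧ a.drop s <+: b

theorem pvFind_nil (l : List Char) : PySem.Chars.find l [] = 0 := by
  cases l <;> simp [PySem.Chars.find, PySem.Chars.find.go]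

-- B's loop returns 0 when no candidate length succeeds
theorem pvB_zero (a b : List Char) (lo : Int) (fuel : Nat) : ∀ (L0 : Int),
    (∀ L : Int, lo ≤ L → L ≤ L0 →
      ¬ PySem.Chars.endswith a (PySem.Chars.slice b none (some L)) = true) →
    ovLoopB a b lo L0 fuel = 0 := by
  induction fuel with
  | zero => intro L0 h; rfl
  | succ fuel ih =>
    intro L0 h
    simp only [ovLoopB]
    split
    · rename_i hlo
      rw [if_neg (h L0 hlo le_rfl)]
      exact ih (L0 - 1) (fun L hL hL' => h L hL (by omega))
    · rfl

-- B's loop returns the largest succeeding candidate length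
theorem pvB_find (a b : List Char) (lo : Int) (fuel : Nat) : ∀ (L0 L : Int),
    lo ≤ L → L ≤ L0 → (L0 - lo + 1).toNat ≤ fuel →
    PySem.Chars.endswith a (PySem.Chars.slice b none (some L)) = true →
    (∀ L' : Int, L < L' → L' ≤ L0 →
      ¬ PySem.Chars.endswith a (PySem.Chars.slice b none (some L')) = true) →
    ovLoopB a b lo L0 fuel = L := by
  induction fuel with
  | zero => intro L0 L hlo hL hfuel _ _; exfalso; omega
  | succ fuel ih =>
    intro L0 L hlo hL hfuel hcond hmax
    simp only [ovLoopB]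
    rw [if_pos (by omega : lo ≤ L0)]
    by_cases hEq : L = L0
    · subst hEq; rw [if_pos hcond]
    · rw [if_neg (hmax L0 (by omega) le_rfl)]
      exact ih (L0 - 1) L hlo (by omega) (by omega) hcond
        (fun L' h1 h2 => hmax L' h1 (by omega))

-- B's test at length L is exactly A's success condition at position len(a) - L
theorem pvCond_iff (a b : List Char) (L : Int) (h30 : 30 ≤ L)
    (hA : L ≤ (a.length : Int)) (hB : L ≤ (b.length : Int)) :
    (PySem.Chars.endswith a (PySem.Chars.slice b none (some L)) = true ↔
      pvSucc a b (a.length - L.toNat)) := by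
  rw [PySem.Chars.endswith_iff, PySem.Chars.slice,
    PySem.List.slice_to b (by omega : (0:Int) ≤ L)]
  have hLb : L.toNat ≤ b.length := by omega
  have hLa : L.toNat ≤ a.length := by omega
  have hlen : (b.take L.toNat).length = L.toNat := by simp [hLb]
  constructor
  · intro h
    have hdrop : b.take L.toNat = a.drop (a.length - (b.take L.toNat).length) :=
      List.suffix_iff_eq_drop.mp h
    rw [hlen] at hdrop
    constructor
    · rw [← hdrop]
      have : (b.take L.toNat).take 30 = b.take 30 := by
        rw [List.take_take]; congr 1; omega
      rw [← this]; exact List.take_prefix 30 _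
    · rw [← hdrop]; exact List.take_prefix _ b
  · rintro ⟨-, h2⟩
    have hdlen : (a.drop (a.length - L.toNat)).length = L.toNat := by
      simp; omega
    have : a.drop (a.length - L.toNat) = b.take L.toNat := by
      have := List.prefix_iff_eq_take.mp h2
      rw [hdlen] at this; exact this
    rw [← this]
    exact (List.suffix_iff_eq_drop).mpr (by rw [hdlen])

-- main invariant of A's scan loop, case len(b) ≥ 30: it computes B's value
theorem pvA_aux (a b : List Char) (hb : 30 ≤ b.length) (fuelB : Nat)
    (hfB : ((min (a.length : Int) (b.length : Int)) - 30 + 1).toNat ≤ fuelB) :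
    ∀ (fuel : Nat) (start : Nat), start ≤ a.length → a.length + 1 ≤ start + fuel →
    (∀ s, s < start → ¬ pvSucc a b s) →
    ovLoopA a b 30 start fuel =
      ovLoopB a b 30 (min (a.length : Int) (b.length : Int)) fuelB := by
  have hsub : PySem.Chars.slice b none (some (30:Int)) = b.take 30 := by
    rw [PySem.Chars.slice, PySem.List.slice_to b (by omega : (0:Int) ≤ 30)]; rfl
  have hsublen : (b.take 30).length = 30 := by simp [hb]
  intro fuel
  induction fuel with
  | zero => intro start h1 h2 _; omega
  | succ fuel ih =>
    intro start hstart hfuel hprev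
    simp only [ovLoopA, hsub]
    by_cases hf : PySem.Chars.findFrom a (b.take 30) (start : Int) none = -1
    · rw [if_pos hf]
      symm
      apply pvB_zero
      intro L hL hLM hcond
      have hA : L ≤ (a.length : Int) := by omega
      have hB : L ≤ (b.length : Int) := by omega
      have hSucc := (pvCond_iff a b L hL hA hB).mp hcond
      by_cases hslt : a.length - L.toNat < start
      · exact hprev _ hslt hSucc
      · have hinfix : b.take 30 <:+: a.drop start := by
          have hdd : a.drop (a.length - L.toNat) = (a.drop start).drop (a.length - L.toNat - start) := by
            rw [List.drop_drop]; congr 1; omega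
          refine (hSucc.1.isInfix).trans ?_
          rw [hdd]
          exact (List.drop_suffix _ _).isInfix
        exact (PySem.Chars.findFrom_natCast_eq_neg_one_iff a (b.take 30) start hstart).mp hf hinfix
    · rw [if_neg hf]
      obtain ⟨hge, hocc, hmin⟩ := PySem.Chars.findFrom_natCast_spec a (b.take 30) start hstart hf
      set f := PySem.Chars.findFrom a (b.take 30) (start : Int) none with hfdef
      have hf0 : (0:Int) ≤ f := le_trans (by positivity) hge
      have hgeN : start ≤ f.toNat := by omega
      have hs30 : f.toNat + 30 ≤ a.length := by
        have h1 := hocc.length_le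
        rw [hsublen] at h1
        simp only [List.length_drop] at h1
        omega
      rw [PySem.Chars.slice, PySem.List.slice_from a hf0]
      by_cases hsw : PySem.Chars.startswith b (a.drop f.toNat) = true
      · rw [if_pos hsw]
        have hpre : a.drop f.toNat <+: b := (PySem.Chars.startswith_iff b _).mp hsw
        have hLb : a.length - f.toNat ≤ b.length := by
          have h1 := hpre.length_le
          simp only [List.length_drop] at h1
          omega
        symm
        apply pvB_find a b 30 fuelB _ ((a.length : Int) - f) (by omega) (by omega) hfB
        · apply (pvCond_iff a b _ (by omega) (by omega) (by omega)).mpr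
          have hsEq : a.length - ((a.length : Int) - f).toNat = f.toNat := by omega
          rw [hsEq]
          exact ⟨hocc, hpre⟩
        · intro L' h1 h2 hcond'
          have hSucc' := (pvCond_iff a b L' (by omega) (by omega) (by omega)).mp hcond'
          by_cases hslt : a.length - L'.toNat < start
          · exact hprev _ hslt hSucc'
          · exact hmin _ (by omega) (by omega) hSucc'.1
      · rw [if_neg hsw]
        apply ih (f.toNat + 1) (by omega) (by omega)
        intro s hslt hSucc
        by_cases h1 : s < start
        · exact hprev s h1 hSucc
        · by_cases h2 : s = f.toNat
          · subst h2
            exact hsw ((PySem.Chars.startswith_iff b _).mpr hSucc.2)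
          · exact hmin s (by omega) (by omega) hSucc.1

-- A's loop returns 0 when len(b) < 30 unless b is a nonempty suffix of a
theorem pvA_short (a b : List Char) (hb : b.length < 30)
    (hs : b = [] ∨ ¬ b <:+ a) :
    ∀ (fuel : Nat) (start : Nat), start ≤ a.length → a.length + 1 ≤ start + fuel →
    ovLoopA a b 30 start fuel = 0 := by
  have hsub : PySem.Chars.slice b none (some (30:Int)) = b := by
    rw [PySem.Chars.slice, PySem.List.slice_to b (by omega : (0:Int) ≤ 30)]
    exact List.take_of_length_le (by omega)
  intro fuel
  induction fuel with
  | zero => intro start h1 h2; omega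
  | succ fuel ih =>
    intro start hstart hfuel
    simp only [ovLoopA, hsub]
    by_cases hf : PySem.Chars.findFrom a b (start : Int) none = -1
    · rw [if_pos hf]
    · rw [if_neg hf]
      obtain ⟨hge, hocc, hmin⟩ := PySem.Chars.findFrom_natCast_spec a b start hstart hf
      set f := PySem.Chars.findFrom a b (start : Int) none with hfdef
      have hf0 : (0:Int) ≤ f := le_trans (by positivity) hge
      have hgeN : start ≤ f.toNat := by omega
      rw [PySem.Chars.slice, PySem.List.slice_from a hf0]
      rcases eq_or_ne b [] with hb0 | hb0
      · -- b = '': find returns start itself; the loop walks start up to len(a)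
        subst hb0
        have hfval : f = (start : Int) := by
          rw [hfdef, PySem.Chars.findFrom_natCast a [] start hstart, pvFind_nil]
          simp
        by_cases hsw : PySem.Chars.startswith [] (a.drop f.toNat) = true
        · rw [if_pos hsw]
          have : a.drop f.toNat = [] := List.prefix_nil.mp ((PySem.Chars.startswith_iff [] _).mp hsw)
          have hlen : a.length ≤ f.toNat := by
            have := congrArg List.length this
            simp only [List.length_drop, List.length_nil] at this
            omega
          omega
        · rw [if_neg hsw]
          have hne : a.drop f.toNat ≠ [] := by
            intro hcon
            exact hsw ((PySem.Chars.startswith_iff [] _).mpr (List.prefix_nil.mpr hcon))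
          have hflt : f.toNat < a.length := by
            by_contra hcon
            exact hne (List.drop_eq_nil_of_le (by omega))
          exact ih (f.toNat + 1) (by omega) (by omega)
      · -- b nonempty and not a suffix of a: the full-match branch can never fire
        have hnsuf : ¬ b <:+ a := hs.resolve_left hb0
        have hblen : 0 < b.length := List.length_pos_iff.mpr hb0
        have hflt : f.toNat < a.length := by
          have h1 := hocc.length_le
          simp only [List.length_drop] at h1
          omega
        by_cases hsw : PySem.Chars.startswith b (a.drop f.toNat) = true
        · exfalso
          have hpre : a.drop f.toNat <+: b := (PySem.Chars.startswith_iff b _).mp hsw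
          have heq : a.drop f.toNat = b := hpre.eq_of_length_le hocc.length_le
          exact hnsuf (heq ▸ List.drop_suffix f.toNat a)
        · rw [if_neg hsw]
          exact ih (f.toNat + 1) (by omega) (by omega)

-- A's loop returns len(b) when a short nonempty b is a suffix of a: the only
-- occurrence of b that passes the startswith check is the final one
theorem pvA_suffix (a b : List Char) (hb : b.length < 30) (hb0 : b ≠ [])
    (hsuf : b <:+ a) :
    ∀ (fuel : Nat) (start : Nat), start ≤ a.length - b.length →
    a.length + 1 ≤ start + fuel →
    ovLoopA a b 30 start fuel = (b.length : Int) := by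
  have hsub : PySem.Chars.slice b none (some (30:Int)) = b := by
    rw [PySem.Chars.slice, PySem.List.slice_to b (by omega : (0:Int) ≤ 30)]
    exact List.take_of_length_le (by omega)
  have hble : b.length ≤ a.length := hsuf.length_le
  have hblen : 0 < b.length := List.length_pos_iff.mpr hb0
  have heqdrop : a.drop (a.length - b.length) = b := (List.suffix_iff_eq_drop.mp hsuf).symm
  intro fuel
  induction fuel with
  | zero => intro start h1 h2; omega
  | succ fuel ih =>
    intro start hstart hfuel
    have hstartle : start ≤ a.length := by omega
    simp only [ovLoopA, hsub]
    by_cases hf : PySem.Chars.findFrom a b (start : Int) none = -1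
    · exfalso
      apply (PySem.Chars.findFrom_natCast_eq_neg_one_iff a b start hstartle).mp hf
      have hdd : a.drop (a.length - b.length) = (a.drop start).drop (a.length - b.length - start) := by
        rw [List.drop_drop]; congr 1; omega
      exact (heqdrop ▸ hdd ▸ (List.drop_suffix (a.length - b.length - start) (a.drop start))).isInfix
    · rw [if_neg hf]
      obtain ⟨hge, hocc, hmin⟩ := PySem.Chars.findFrom_natCast_spec a b start hstartle hf
      set f := PySem.Chars.findFrom a b (start : Int) none with hfdef
      have hf0 : (0:Int) ≤ f := le_trans (by positivity) hge
      have hgeN : start ≤ f.toNat := by omega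
      have hfle : f.toNat ≤ a.length - b.length := by
        by_contra hcon
        refine hmin (a.length - b.length) (by omega) (by omega) ?_
        rw [heqdrop]
      rw [PySem.Chars.slice, PySem.List.slice_from a hf0]
      by_cases hsw : PySem.Chars.startswith b (a.drop f.toNat) = true
      · rw [if_pos hsw]
        have hpre : a.drop f.toNat <+: b := (PySem.Chars.startswith_iff b _).mp hsw
        have heq : a.drop f.toNat = b := hpre.eq_of_length_le hocc.length_le
        have hlen : a.length - f.toNat = b.length := by
          have := congrArg List.length heq
          simp only [List.length_drop] at this
          omega
        omega
      · rw [if_neg hsw]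
        have hne : f.toNat ≠ a.length - b.length := by
          intro hcon
          exact hsw ((PySem.Chars.startswith_iff b _).mpr (by rw [hcon, heqdrop]))
        exact ih (f.toNat + 1) (by omega) (by omega)

-- the two overlap functions agree everywhere
theorem pvOverlap_eq (a b : String) : overlapA a b 30 = overlapB a b 30 := by
  have hlen : PySem.Str.len b = (b.toList.length : Int) := rfl
  have hlena : PySem.Str.len a = (a.toList.length : Int) := rfl
  unfold overlapA overlapB
  rw [hlen, hlena]
  by_cases hb : 30 ≤ b.toList.length
  · have hlo : min (30:Int) (b.toList.length : Int) = 30 := by omega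
    rw [hlo]
    exact pvA_aux a.toList b.toList hb _ le_rfl (a.toList.length + 1) 0
      (Nat.zero_le _) (by omega) (fun s h _ => absurd h (Nat.not_lt_zero s))
  · have hlo : min (30:Int) (b.toList.length : Int) = (b.toList.length : Int) := by omega
    rw [hlo]
    rcases eq_or_ne b.toList [] with hb0 | hb0
    · -- b = '': A scans to the end and returns 0; B's only candidate is L = 0
      rw [pvA_short a.toList b.toList (by omega) (Or.inl hb0) (a.toList.length + 1) 0
        (Nat.zero_le _) (by omega)]
      rw [hb0]
      simp only [List.length_nil, Nat.cast_zero]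
      have hM : min ((a.toList.length : Int)) 0 = 0 := by omega
      rw [hM]
      have hfuel : ((0:Int) - 0 + 1).toNat = 1 := by omega
      rw [hfuel]
      simp only [ovLoopB]
      rw [if_pos le_rfl, if_pos]
      apply (PySem.Chars.endswith_iff _ _).mpr
      rw [PySem.Chars.slice, PySem.List.slice_to _ (le_refl (0:Int))]
      simp
    · by_cases hsuf : b.toList <:+ a.toList
      · -- short nonempty suffix: both return len(b)
        have hble : b.toList.length ≤ a.toList.length := hsuf.length_le
        rw [pvA_suffix a.toList b.toList (by omega) hb0 hsuf (a.toList.length + 1) 0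
          (Nat.zero_le _) (by omega)]
        have hM : min (a.toList.length : Int) (b.toList.length : Int) = (b.toList.length : Int) := by
          omega
        rw [hM]
        have hfuel : ((b.toList.length : Int) - (b.toList.length : Int) + 1).toNat = 1 := by omega
        rw [hfuel]
        simp only [ovLoopB]
        rw [if_pos le_rfl, if_pos]
        apply (PySem.Chars.endswith_iff _ _).mpr
        rw [PySem.Chars.slice, PySem.List.slice_to _ (by positivity)]
        rw [Int.toNat_natCast, List.take_length]
        exact hsuf
      · -- short, not a suffix: both return 0
        rw [pvA_short a.toList b.toList (by omega) (Or.inr hsuf) (a.toList.length + 1) 0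
          (Nat.zero_le _) (by omega)]
        symm
        apply pvB_zero
        intro L hL hLM hcond
        apply hsuf
        have hLeq : L = (b.toList.length : Int) := by omega
        subst hLeq
        have := (PySem.Chars.endswith_iff _ _).mp hcond
        rw [PySem.Chars.slice, PySem.List.slice_to _ (by positivity),
          Int.toNat_natCast, List.take_length] at this
        exact this

-- B's comprehension entries for one read, folded as inserts, match A's inner loop
theorem pvInner (r : String) :
    ∀ (relates : List String) (d : PySem.Dict (String × String) Int),
    relates.foldl (fun olaps relateread =>
        if relateread ≠ r then
          let olen := overlapA r relateread 30
          if olen > 0 then olaps.insert (r, relateread) olen else olaps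
        else olaps) d
      = (relates.filterMap (fun q =>
          if q ≠ r then
            let olen := overlapB r q 30
            if olen > 0 then some ((r, q), olen) else none
          else none)).foldl
        (fun d e => d.insert e.1 e.2) d := by
  intro relates
  induction relates with
  | nil => intro d; rfl
  | cons q rest ih =>
    intro d
    simp only [List.foldl_cons, List.filterMap_cons]
    by_cases hq : q ≠ r
    · rw [if_pos hq, if_pos hq, ← pvOverlap_eq r q]
      by_cases h0 : overlapA r q 30 > 0
      · simp only [if_pos h0, List.foldl_cons]
        exact ih _
      · simp only [if_neg h0]
        exact ih _
    · rw [if_neg hq, if_neg hq]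
      exact ih _

-- the whole driver: A's nested loops equal B's comprehension fold
theorem pvOuter (dic : List (String × List String)) :
    ∀ (reads : List String) (d : PySem.Dict (String × String) Int),
    reads.foldl (fun olaps read =>
        let keypart := PySem.Str.slice read (some (-30)) none
        let relates := (PySem.Dict.mk dic).getD keypart []
        relates.foldl (fun olaps relateread =>
          if relateread ≠ read then
            let olen := overlapA read relateread 30
            if olen > 0 then olaps.insert (read, relateread) olen else olaps
          else olaps) olaps) d
      = ((reads.flatMap (fun r =>
          ((PySem.Dict.mk dic).getD (PySem.Str.slice r (some (-30)) none) []).filterMap (fun q =>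
            if q ≠ r then
              let olen := overlapB r q 30
              if olen > 0 then some ((r, q), olen) else none
            else none))).foldl
        (fun d e => d.insert e.1 e.2) d) := by
  intro reads
  induction reads with
  | nil => intro d; rfl
  | cons r rest ih =>
    intro d
    simp only [List.foldl_cons, List.flatMap_cons, List.foldl_append]
    rw [pvInner r _ d]
    exact ih _

-- ===== VERDICT (by name: the statement is the Claim_ definition above) =====
theorem betteroverlap_spec : Claim_equal_betteroverlap := by
  intro reads dic _ _
  unfold Spec_betteroverlap betteroverlap betteroverlap_alt
  congr 1
  refine congrArg PySem.Dict.items ?_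
  apply pvOuter
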